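-- pv_equiv track=rewrite | github.com/whotf-ash/RIB-Encryption | RIB.py | remove_a_every_2_letters
-- ===== SOURCE A (Python) =====
-- def remove_a_every_2_letters(data):
--     result = ''
--     for _ in range(2):
--         for i in range(0, len(data), 3):
--             result += data[i:i+2]
--         data = result
--         result = ''
--     return data
-- ===== SOURCE B (Python) =====
-- def remove_a_every_2_letters(data):
--     for _ in range(2):
--         data = ''.join(c for i, c in enumerate(data) if i % 3 != 2)
--     return data
-- ===== Notes on version B (the rewrite author's own statement) =====
-- stated objective: idiomatic
-- what changed: Replaces the step-3 slice-and-concatenate inner loop (result += data[i:i+2]) with a single enumerate pass that filters out every character whose index is 2 mod 3, joined once.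
import Mathlib
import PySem

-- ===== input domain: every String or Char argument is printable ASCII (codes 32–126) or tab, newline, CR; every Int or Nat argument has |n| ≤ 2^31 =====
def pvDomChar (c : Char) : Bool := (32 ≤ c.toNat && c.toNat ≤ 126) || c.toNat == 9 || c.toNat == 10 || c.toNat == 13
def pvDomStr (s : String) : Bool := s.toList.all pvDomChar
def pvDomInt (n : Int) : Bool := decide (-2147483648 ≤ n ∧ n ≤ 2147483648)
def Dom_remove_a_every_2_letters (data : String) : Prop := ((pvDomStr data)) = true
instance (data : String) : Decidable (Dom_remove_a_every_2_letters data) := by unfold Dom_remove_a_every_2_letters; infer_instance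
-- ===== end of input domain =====

-- B replaces A's step-3 slice concatenation with one enumerate-filter pass per round (idiomatic; same cost).

-- ===== PORT A =====
-- inner loop: for i in range(0, len(data), 3): result += data[i:i+2]
def pvInnerA (data : List Char) : List Char :=
  (PySem.List.pyRange 0 (data.length : Int) 3).foldl
    (fun result i => result ++ PySem.List.slice data (some i) (some (i + 2))) []

def remove_a_every_2_letters (data : String) : String :=
  String.ofList ((PySem.List.pyRange 0 2 1).foldl (fun d _ => pvInnerA d) data.toList)

-- ===== PORT B =====
-- ''.join(c for i, c in enumerate(data) if i % 3 != 2)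
def pvInnerB (data : List Char) : List Char :=
  ((PySem.List.enumerate data 0).filter (fun p => PySem.Int.mod p.1 3 != 2)).map (fun p => p.2)

def remove_a_every_2_letters_alt (data : String) : String :=
  String.ofList ((PySem.List.pyRange 0 2 1).foldl (fun d _ => pvInnerB d) data.toList)

-- ===== PRECONDITION & SPEC =====
def Spec_remove_a_every_2_letters (data : String) (out : String) : Prop := out = remove_a_every_2_letters_alt data
instance (data : String) (out : String) : Decidable (Spec_remove_a_every_2_letters data out) := by unfold Spec_remove_a_every_2_letters; infer_instance

-- ===== CLAIM (what is proved, stated in full; the proofs are below) =====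
def Claim_equal_remove_a_every_2_letters : Prop := ∀ (data : String), Dom_remove_a_every_2_letters data → Spec_remove_a_every_2_letters data (remove_a_every_2_letters data)

-- ===== LEMMAS AND PROOFS =====

-- the common "keep two of every three characters" recursion both inner passes compute
def pvKeep2of3 : List Char → List Char
  | [] => []
  | [a] => [a]
  | [a, b] => [a, b]
  | a :: b :: _ :: t => a :: b :: pvKeep2of3 t

lemma pvChunks (cs : List Char) :
    (List.range ((cs.length + 2) / 3)).flatMap (fun k => (cs.drop (3 * k)).take 2) = pvKeep2of3 cs := by
  induction cs using pvKeep2of3.induct with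
  | case1 => rfl
  | case2 a => simp [pvKeep2of3]
  | case3 a b => simp [pvKeep2of3]
  | case4 a b c t ih =>
    have hlen : ((a :: b :: c :: t).length + 2) / 3 = (t.length + 2) / 3 + 1 := by
      simp only [List.length_cons]; omega
    rw [hlen, List.range_succ_eq_map, List.flatMap_cons, List.flatMap_map]
    have hshift : (fun k => ((a :: b :: c :: t).drop (3 * Nat.succ k)).take 2)
        = fun k => (t.drop (3 * k)).take 2 := by
      funext k
      rw [show 3 * Nat.succ k = 3 + 3 * k by omega, ← List.drop_drop]
      rfl
    rw [hshift, ih]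
    rfl

lemma pvInnerA_eq (cs : List Char) : pvInnerA cs = pvKeep2of3 cs := by
  unfold pvInnerA
  rw [PySem.List.foldl_append_eq_flatMap, List.nil_append]
  rw [PySem.List.pyRange_of_pos 0 (cs.length : Int) (by norm_num)]
  have hcnt : (if (0 : Int) < (cs.length : Int) then (((cs.length : Int) - 0 + 3 - 1) / 3).toNat else 0)
      = (cs.length + 2) / 3 := by
    split_ifs with h
    · omega
    · omega
  rw [hcnt, List.flatMap_map, ← pvChunks]
  apply List.flatMap_congr
  intro k _
  simpa using PySem.List.slice_natCast_add cs (3 * k) 2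

lemma pvInnerB_gen : ∀ (cs : List Char) (j : Nat),
    ((PySem.List.enumerate cs ((3 * j : Nat) : Int)).filter (fun p => PySem.Int.mod p.1 3 != 2)).map (fun p => p.2)
      = pvKeep2of3 cs := by
  intro cs
  induction cs using pvKeep2of3.induct with
  | case1 => intro j; rfl
  | case2 a =>
    intro j
    simp [PySem.List.enumerate, List.filter, pvKeep2of3]
  | case3 a b =>
    intro j
    simp [PySem.List.enumerate, List.filter, pvKeep2of3]
  | case4 a b c t ih =>
    intro j
    have h0 : (PySem.Int.mod ((3 * j : Nat) : Int) 3 != 2) = true := by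
      rw [PySem.Int.mod_eq_emod_of_pos (by norm_num)]; simp
    have h1 : (PySem.Int.mod (((3 * j : Nat) : Int) + 1) 3 != 2) = true := by
      rw [PySem.Int.mod_eq_emod_of_pos (by norm_num)]; simp
    have h2 : (PySem.Int.mod (((3 * j : Nat) : Int) + 1 + 1) 3 != 2) = false := by
      rw [PySem.Int.mod_eq_emod_of_pos (by norm_num)]; simp; omega
    have hrest : ((3 * j : Nat) : Int) + 1 + 1 + 1 = ((3 * (j + 1) : Nat) : Int) := by push_cast; ring
    rw [PySem.List.enumerate_cons, PySem.List.enumerate_cons, PySem.List.enumerate_cons, hrest]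
    simp only [List.filter, h0, h1, h2, List.map, pvKeep2of3]
    rw [ih (j + 1)]

lemma pvInnerB_eq (cs : List Char) : pvInnerB cs = pvKeep2of3 cs := by
  have := pvInnerB_gen cs 0
  simpa [pvInnerB] using this

-- ===== VERDICT (by name: the statement is the Claim_ definition above) =====
theorem remove_a_every_2_letters_spec : Claim_equal_remove_a_every_2_letters := by
  intro data _
  unfold Spec_remove_a_every_2_letters remove_a_every_2_letters remove_a_every_2_letters_alt
  have h2 : PySem.List.pyRange 0 2 1 = [0, 1] := by decide
  rw [h2]
  simp only [List.foldl]
  rw [pvInnerA_eq, pvInnerB_eq, pvInnerA_eq, pvInnerB_eq]
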